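-- pv_equiv track=rewrite | github.com/jotatito05/Validador-de-Contrase-as | utils.py | detectar_secuencia_numerica
-- ===== SOURCE A (Python) =====
-- def detectar_secuencia_numerica(texto):
--     """
--     Detecta secuencias numéricas comunes en el texto (ej: 123, 1234, 456).
--
--     Args:
--         texto (str): El texto a verificar
--
--     Returns:
--         bool: True si se detecta una secuencia numérica, False en caso contrario
--     """
--     # Buscar secuencias ascendentes de 3 o más dígitos consecutivos
--     for i in range(len(texto) - 2):
--         if texto[i:i+3].isdigit():
--             nums = [int(texto[i+j]) for j in range(3)]
--             if nums[1] == nums[0] + 1 and nums[2] == nums[1] + 1: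
--                 return True
--
--     # Buscar secuencias descendentes
--     for i in range(len(texto) - 2):
--         if texto[i:i+3].isdigit():
--             nums = [int(texto[i+j]) for j in range(3)]
--             if nums[1] == nums[0] - 1 and nums[2] == nums[1] - 1:
--                 return True
--
--     return False
-- ===== SOURCE B (Python) =====
-- _SECUENCIAS = ["012", "123", "234", "345", "456", "567", "678", "789",
--                "987", "876", "765", "654", "543", "432", "321", "210"]
--
--
-- def detectar_secuencia_numerica(texto):
--     """Tabla fija: las 16 ternas validas (8 ascendentes, 8 descendentes),
--     buscadas como subcadenas."""
--     return any(seq in texto for seq in _SECUENCIAS)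
-- ===== Notes on version B (the rewrite author's own statement) =====
-- stated objective: simpler
-- what changed: Replaced the two positional digit-by-digit index scans (slice + isdigit + per-char int conversion and arithmetic) by a fixed table of the 16 valid three-digit runs tested as substring membership.
import Mathlib
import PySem

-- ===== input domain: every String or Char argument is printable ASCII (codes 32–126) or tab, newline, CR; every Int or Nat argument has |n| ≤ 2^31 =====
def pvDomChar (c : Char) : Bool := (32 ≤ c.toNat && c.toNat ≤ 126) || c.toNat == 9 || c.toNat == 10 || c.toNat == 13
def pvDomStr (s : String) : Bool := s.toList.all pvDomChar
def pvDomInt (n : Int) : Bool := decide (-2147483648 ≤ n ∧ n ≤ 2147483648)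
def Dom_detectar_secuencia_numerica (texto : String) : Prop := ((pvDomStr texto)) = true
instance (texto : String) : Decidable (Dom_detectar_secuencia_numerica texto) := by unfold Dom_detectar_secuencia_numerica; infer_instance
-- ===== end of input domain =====

-- B replaces A's two positional digit-by-digit scans by a fixed table of the 16 valid
-- three-digit runs tested as substrings (objective: simpler; not claimed faster).


-- ===== PORT A =====
-- int(texto[i+j]) under the slice-isdigit guard: the numeric value of one ASCII digit
-- character (exact there: the isdigit guard guarantees an ASCII digit).
def pvDigitInt (c : Char) : Int := (c.toNat : Int) - 48

def detectar_secuencia_numerica (texto : String) : Bool :=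
  let cs := texto.toList
  let n : Int := (cs.length : Int)
  -- first loop: ascending runs of 3 consecutive digits
  let asc := (PySem.List.pyRange 0 (n - 2) 1).any (fun i =>
    PySem.Chars.strIsdigit (PySem.List.slice cs (some i) (some (i + 3))) &&
      (let nums := (PySem.List.pyRange 0 3 1).map
          (fun j => pvDigitInt (PySem.List.pyGetD cs (i + j) ' '));
       (PySem.List.pyGetD nums 1 0 == PySem.List.pyGetD nums 0 0 + 1) &&
       (PySem.List.pyGetD nums 2 0 == PySem.List.pyGetD nums 1 0 + 1)))
  if asc then true
  else
    -- second loop: descending runs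
    let desc := (PySem.List.pyRange 0 (n - 2) 1).any (fun i =>
      PySem.Chars.strIsdigit (PySem.List.slice cs (some i) (some (i + 3))) &&
        (let nums := (PySem.List.pyRange 0 3 1).map
            (fun j => pvDigitInt (PySem.List.pyGetD cs (i + j) ' '));
         (PySem.List.pyGetD nums 1 0 == PySem.List.pyGetD nums 0 0 - 1) &&
         (PySem.List.pyGetD nums 2 0 == PySem.List.pyGetD nums 1 0 - 1)))
    if desc then true else false

-- ===== PORT B =====
def pvSecuencias : List String :=
  ["012", "123", "234", "345", "456", "567", "678", "789",
   "987", "876", "765", "654", "543", "432", "321", "210"]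

def detectar_secuencia_numerica_alt (texto : String) : Bool :=
  pvSecuencias.any (fun seq => PySem.Str.isIn seq texto)

-- ===== PRECONDITION & SPEC =====
def Spec_detectar_secuencia_numerica (texto : String) (out : Bool) : Prop := out = detectar_secuencia_numerica_alt texto
instance (texto : String) (out : Bool) : Decidable (Spec_detectar_secuencia_numerica texto out) := by unfold Spec_detectar_secuencia_numerica; infer_instance

-- ===== CLAIM (what is proved, stated in full; the proofs are below) =====
def Claim_equal_detectar_secuencia_numerica : Prop := ∀ (texto : String), Dom_detectar_secuencia_numerica texto → Spec_detectar_secuencia_numerica texto (detectar_secuencia_numerica texto)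

-- ===== LEMMAS AND PROOFS =====

-- the common shape both ports reduce to: a sliding window of width 3
def pvTri3 (p : Char → Char → Char → Bool) : List Char → Bool
  | a :: b :: c :: t => p a b c || pvTri3 p (b :: c :: t)
  | _ => false

theorem pvAny_congr_mem {α : Type} {l : List α} {p q : α → Bool}
    (h : ∀ a ∈ l, p a = q a) : l.any p = l.any q := by
  induction l with
  | nil => rfl
  | cons x t ih =>
    simp only [List.any_cons, h x (by simp), ih (fun a ha => h a (by simp [ha]))]

theorem pvWindow3 (cs : List Char) : ∀ (i : Nat), i + 2 < cs.length →
    (cs.drop i).take 3 = [cs.getD i ' ', cs.getD (i+1) ' ', cs.getD (i+2) ' '] := by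
  induction cs with
  | nil => intro i h; simp at h
  | cons a t ih =>
    intro i h
    cases i with
    | zero =>
      match t, h with
      | b :: c :: t', _ => simp
    | succ j =>
      simp only [List.drop_succ_cons, List.getD_cons_succ]
      exact ih j (by simpa using h)

theorem pvRangeWindow (P : Char → Char → Char → Bool) :
    ∀ cs : List Char,
      (List.range (cs.length - 2)).any
        (fun i => P (cs.getD i ' ') (cs.getD (i+1) ' ') (cs.getD (i+2) ' '))
      = pvTri3 P cs
  | [] => by simp [pvTri3]
  | [a] => by simp [pvTri3]
  | [a, b] => by simp [pvTri3]
  | a :: b :: c :: t => by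
    have ih := pvRangeWindow P (b :: c :: t)
    simp only [List.length_cons] at *
    have hlen : t.length + 1 + 1 + 1 - 2 = (t.length + 1 + 1 - 2) + 1 := by omega
    rw [hlen, List.range_succ_eq_map, List.any_cons, List.any_map]
    rw [pvTri3, ← ih]
    congr 1

theorem pvTri3_or (p q : Char → Char → Char → Bool) :
    ∀ cs : List Char, (pvTri3 p cs || pvTri3 q cs) = pvTri3 (fun a b c => p a b c || q a b c) cs
  | [] => by simp [pvTri3]
  | [a] => by simp [pvTri3]
  | [a, b] => by simp [pvTri3]
  | a :: b :: c :: t => by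
    have ih := pvTri3_or p q (b :: c :: t)
    rw [pvTri3, pvTri3, pvTri3, ← ih]
    cases p a b c <;> cases q a b c <;> simp [Bool.or_comm]

theorem pvTri3_congr {p q : Char → Char → Char → Bool}
    (h : ∀ a b c, p a b c = q a b c) : ∀ cs : List Char, pvTri3 p cs = pvTri3 q cs
  | [] => by simp [pvTri3]
  | [a] => by simp [pvTri3]
  | [a, b] => by simp [pvTri3]
  | a :: b :: c :: t => by
    rw [pvTri3, pvTri3, h a b c, pvTri3_congr h (b :: c :: t)]

theorem pvTri3_infix (x y z : Char) :
    ∀ cs : List Char, (pvTri3 (fun a b c => a == x && b == y && c == z) cs = true) ↔ [x, y, z] <:+: cs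
  | [] => by
    simp only [pvTri3]
    constructor
    · intro h; simp at h
    · intro h; have := h.length_le; simp at this
  | [a] => by
    simp only [pvTri3]
    constructor
    · intro h; simp at h
    · intro h; have := h.length_le; simp at this
  | [a, b] => by
    simp only [pvTri3]
    constructor
    · intro h; simp at h
    · intro h; have := h.length_le; simp at this
  | a :: b :: c :: t => by
    rw [pvTri3, List.infix_cons_iff]
    simp only [Bool.or_eq_true, Bool.and_eq_true, beq_iff_eq,
      pvTri3_infix x y z (b :: c :: t), List.cons_prefix_cons, List.nil_prefix, and_true]
    tauto

theorem pvIsIn3 (x y z : Char) (cs : List Char) :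
    PySem.Chars.isIn [x, y, z] cs = pvTri3 (fun a b c => a == x && b == y && c == z) cs := by
  rw [Bool.eq_iff_iff, PySem.Chars.isIn_iff_infix, pvTri3_infix]

-- A's index loop over pyRange, with the isdigit guard on the slice, as a pvTri3 window
theorem pvLoopEq (p : Char → Char → Char → Bool) (cs : List Char) :
    (PySem.List.pyRange 0 ((cs.length : Int) - 2) 1).any (fun i =>
        PySem.Chars.strIsdigit (PySem.List.slice cs (some i) (some (i + 3))) &&
        p (PySem.List.pyGetD cs i ' ') (PySem.List.pyGetD cs (i + 1) ' ')
          (PySem.List.pyGetD cs (i + 2) ' '))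
    = pvTri3 (fun a b c => PySem.Chars.strIsdigit [a, b, c] && p a b c) cs := by
  by_cases h2 : 2 ≤ cs.length
  · have hcast : ((cs.length : Int) - 2) = ((cs.length - 2 : Nat) : Int) := by omega
    rw [hcast, PySem.List.pyRange_zero_natCast, List.any_map, ← pvRangeWindow]
    apply pvAny_congr_mem
    intro i hi
    have hi' : i + 2 < cs.length := by
      simp only [List.mem_range] at hi; omega
    have hw := pvWindow3 cs i hi'
    have h3 : ((i : Int) + 3) = ((i + 3 : Nat) : Int) := by push_cast; ring
    have h1 : ((i : Int) + 1) = ((i + 1 : Nat) : Int) := by push_cast; ring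
    have hs2 : ((i : Int) + 2) = ((i + 2 : Nat) : Int) := by push_cast; ring
    show (PySem.Chars.strIsdigit (PySem.List.slice cs (some (i : Int)) (some ((i : Int) + 3))) && _) = _
    rw [h3, PySem.List.slice_natCast, show i + 3 - i = 3 from by omega, hw]
    simp only [h1, hs2, PySem.List.pyGetD_natCast]
  · rcases cs with _ | ⟨a, _ | ⟨b, t⟩⟩
    · norm_num [pvTri3, show PySem.List.pyRange 0 (-2:Int) 1 = [] from by decide]
    · norm_num [pvTri3, show PySem.List.pyRange 0 (-1:Int) 1 = [] from by decide]
    · simp at h2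

-- the inner nums-list of A's loop body, computed out
theorem pvBody (cs : List Char) (d : Int) : ∀ i : Int,
    (PySem.Chars.strIsdigit (PySem.List.slice cs (some i) (some (i + 3))) &&
      (let nums := (PySem.List.pyRange 0 3 1).map
          (fun j => pvDigitInt (PySem.List.pyGetD cs (i + j) ' '));
       (PySem.List.pyGetD nums 1 0 == PySem.List.pyGetD nums 0 0 + d) &&
       (PySem.List.pyGetD nums 2 0 == PySem.List.pyGetD nums 1 0 + d)))
    = (PySem.Chars.strIsdigit (PySem.List.slice cs (some i) (some (i + 3))) &&
       ((pvDigitInt (PySem.List.pyGetD cs (i + 1) ' ') == pvDigitInt (PySem.List.pyGetD cs i ' ') + d) &&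
        (pvDigitInt (PySem.List.pyGetD cs (i + 2) ' ') == pvDigitInt (PySem.List.pyGetD cs (i + 1) ' ') + d))) := by
  intro i
  rw [show PySem.List.pyRange 0 3 1 = [0, 1, 2] from by decide]
  simp [PySem.List.pyGetD, add_zero]

theorem pvBodyS (cs : List Char) (d : Int) : ∀ i : Int,
    (PySem.Chars.strIsdigit (PySem.List.slice cs (some i) (some (i + 3))) &&
      (let nums := (PySem.List.pyRange 0 3 1).map
          (fun j => pvDigitInt (PySem.List.pyGetD cs (i + j) ' '));
       (PySem.List.pyGetD nums 1 0 == PySem.List.pyGetD nums 0 0 - d) &&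
       (PySem.List.pyGetD nums 2 0 == PySem.List.pyGetD nums 1 0 - d)))
    = (PySem.Chars.strIsdigit (PySem.List.slice cs (some i) (some (i + 3))) &&
       ((pvDigitInt (PySem.List.pyGetD cs (i + 1) ' ') == pvDigitInt (PySem.List.pyGetD cs i ' ') - d) &&
        (pvDigitInt (PySem.List.pyGetD cs (i + 2) ' ') == pvDigitInt (PySem.List.pyGetD cs (i + 1) ' ') - d))) := by
  intro i
  rw [show PySem.List.pyRange 0 3 1 = [0, 1, 2] from by decide]
  simp [PySem.List.pyGetD, add_zero]

theorem pvCharEqNat (a d : Char) : a = d ↔ a.val.toNat = d.val.toNat := by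
  constructor
  · intro h; rw [h]
  · intro h; exact Char.ext (UInt32.toNat_inj.mp h)

theorem pvIsdigitIff (a : Char) : PySem.Chars.isdigit a = true ↔ 48 ≤ a.val.toNat ∧ a.val.toNat ≤ 57 := by
  simp only [PySem.Chars.isdigit, Bool.and_eq_true, decide_eq_true_eq,
    Char.le_def, UInt32.le_iff_toNat_le]
  exact Iff.rfl

-- the heart of the equivalence: a window of 3 characters is an ascending or descending
-- digit run iff it is one of the 16 table triples
theorem pvPointwise (a b c : Char) :
    ((PySem.Chars.strIsdigit [a,b,c] && ((pvDigitInt b == pvDigitInt a + 1) && (pvDigitInt c == pvDigitInt b + 1))) ||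
     (PySem.Chars.strIsdigit [a,b,c] && ((pvDigitInt b == pvDigitInt a - 1) && (pvDigitInt c == pvDigitInt b - 1))))
    = ((a == '0' && b == '1' && c == '2') || ((a == '1' && b == '2' && c == '3') || ((a == '2' && b == '3' && c == '4') || ((a == '3' && b == '4' && c == '5') || ((a == '4' && b == '5' && c == '6') || ((a == '5' && b == '6' && c == '7') || ((a == '6' && b == '7' && c == '8') || ((a == '7' && b == '8' && c == '9') || ((a == '9' && b == '8' && c == '7') || ((a == '8' && b == '7' && c == '6') || ((a == '7' && b == '6' && c == '5') || ((a == '6' && b == '5' && c == '4') || ((a == '5' && b == '4' && c == '3') || ((a == '4' && b == '3' && c == '2') || ((a == '3' && b == '2' && c == '1') || (a == '2' && b == '1' && c == '0')))))))))))))))) := by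
  rw [Bool.eq_iff_iff]
  simp only [PySem.Chars.strIsdigit, List.isEmpty_cons, Bool.not_false, Bool.true_and,
    List.all_cons, List.all_nil, Bool.and_true, Bool.and_eq_true, Bool.or_eq_true,
    beq_iff_eq, pvIsdigitIff, pvDigitInt, Char.toNat, pvCharEqNat,
    show ('0':Char).val.toNat = 48 from by decide,
    show ('1':Char).val.toNat = 49 from by decide,
    show ('2':Char).val.toNat = 50 from by decide,
    show ('3':Char).val.toNat = 51 from by decide,
    show ('4':Char).val.toNat = 52 from by decide,
    show ('5':Char).val.toNat = 53 from by decide,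
    show ('6':Char).val.toNat = 54 from by decide,
    show ('7':Char).val.toNat = 55 from by decide,
    show ('8':Char).val.toNat = 56 from by decide,
    show ('9':Char).val.toNat = 57 from by decide,]
  generalize a.val.toNat = na
  generalize b.val.toNat = nb
  generalize c.val.toNat = nc
  constructor
  · rintro (⟨⟨⟨ha1, ha2⟩, ⟨hb1, hb2⟩, hc1, hc2⟩, h1, h2⟩ | ⟨⟨⟨ha1, ha2⟩, ⟨hb1, hb2⟩, hc1, hc2⟩, h1, h2⟩)
    · have hb' : nb = na + 1 := by omega
      have hc' : nc = na + 2 := by omega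
      subst hb' hc'
      have hla : 48 ≤ na := ha1
      have hua : na ≤ 55 := by omega
      interval_cases na <;> decide
    · have hb' : nb = nc + 1 := by omega
      have ha' : na = nc + 2 := by omega
      subst hb' ha'
      have hlc : 48 ≤ nc := hc1
      have huc : nc ≤ 55 := by omega
      interval_cases nc <;> decide
  · rintro (⟨⟨h1, h2⟩, h3⟩ | ⟨⟨h1, h2⟩, h3⟩ | ⟨⟨h1, h2⟩, h3⟩ | ⟨⟨h1, h2⟩, h3⟩ | ⟨⟨h1, h2⟩, h3⟩ | ⟨⟨h1, h2⟩, h3⟩ | ⟨⟨h1, h2⟩, h3⟩ | ⟨⟨h1, h2⟩, h3⟩ | ⟨⟨h1, h2⟩, h3⟩ | ⟨⟨h1, h2⟩, h3⟩ | ⟨⟨h1, h2⟩, h3⟩ | ⟨⟨h1, h2⟩, h3⟩ | ⟨⟨h1, h2⟩, h3⟩ | ⟨⟨h1, h2⟩, h3⟩ | ⟨⟨h1, h2⟩, h3⟩ | ⟨⟨h1, h2⟩, h3⟩) <;>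
      subst h1 <;> subst h2 <;> subst h3 <;> decide

-- ===== VERDICT (by name: the statement is the Claim_ definition above) =====
set_option maxHeartbeats 1000000 in
theorem detectar_secuencia_numerica_spec : Claim_equal_detectar_secuencia_numerica := by
  intro texto _
  unfold Spec_detectar_secuencia_numerica detectar_secuencia_numerica detectar_secuencia_numerica_alt pvSecuencias
  simp only []
  rw [List.any_congr rfl (pvBody texto.toList 1)]
  rw [List.any_congr rfl (pvBodyS texto.toList 1)]
  simp only [pvLoopEq (fun x y z => (pvDigitInt y == pvDigitInt x + 1) && (pvDigitInt z == pvDigitInt y + 1)) texto.toList,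
             pvLoopEq (fun x y z => (pvDigitInt y == pvDigitInt x - 1) && (pvDigitInt z == pvDigitInt y - 1)) texto.toList]
  rw [show ∀ b1 b2 : Bool, (if b1 then true else if b2 then true else false) = (b1 || b2) from
      by intro b1 b2; cases b1 <;> cases b2 <;> rfl]
  rw [pvTri3_or]
  simp only [List.any_cons, List.any_nil, Bool.or_false, PySem.Str.isIn_eq]
  rw [show ("012":String).toList = ['0', '1', '2'] from by decide]
  rw [show ("123":String).toList = ['1', '2', '3'] from by decide]
  rw [show ("234":String).toList = ['2', '3', '4'] from by decide]
  rw [show ("345":String).toList = ['3', '4', '5'] from by decide]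
  rw [show ("456":String).toList = ['4', '5', '6'] from by decide]
  rw [show ("567":String).toList = ['5', '6', '7'] from by decide]
  rw [show ("678":String).toList = ['6', '7', '8'] from by decide]
  rw [show ("789":String).toList = ['7', '8', '9'] from by decide]
  rw [show ("987":String).toList = ['9', '8', '7'] from by decide]
  rw [show ("876":String).toList = ['8', '7', '6'] from by decide]
  rw [show ("765":String).toList = ['7', '6', '5'] from by decide]
  rw [show ("654":String).toList = ['6', '5', '4'] from by decide]
  rw [show ("543":String).toList = ['5', '4', '3'] from by decide]
  rw [show ("432":String).toList = ['4', '3', '2'] from by decide]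
  rw [show ("321":String).toList = ['3', '2', '1'] from by decide]
  rw [show ("210":String).toList = ['2', '1', '0'] from by decide]
  simp only [pvIsIn3, pvTri3_or]
  exact pvTri3_congr pvPointwise texto.toList
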